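-- pv_equiv track=rewrite | github.com/de-algorithm/coding-test-study | tjpark/2주차/여행경로.py | dfs
-- ===== SOURCE A (Python) =====
-- def dfs(tickets_dic, stack, path):
--     if not stack:
--         path.reverse()
--         return path
--
--     depart = stack[-1]
--
--     # 출발지에 해당하는 티켓 있는지 확인
--     if depart in tickets_dic and tickets_dic[depart]:
--         # 도착지를 스택에 저장
--         arrive = tickets_dic[depart].pop()
--         stack.append(arrive)
--     else:
--         # 티켓이 없을 경우
--         # 1. 해당 장소에서 출발하는 티켓이 없는 경우
--         # 2. 출발하는 티켓은 존재하나 모두 소진한 경우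
--         no_ticket = stack.pop()
--         path.append(no_ticket)
--
--     return dfs(tickets_dic, stack, path)
-- ===== SOURCE B (Python) =====
-- def dfs(tickets_dic, stack, path):
--     # Classic recursive Hierholzer: visit a node's remaining tickets depth-first,
--     # append the node in post-order, then reverse.  Same in-place mutations of
--     # tickets_dic / stack / path as A; returns the same path object.
--     def visit(node):
--         bucket = tickets_dic.get(node)
--         while bucket:
--             visit(bucket.pop())
--         path.append(node)
--     while stack:
--         visit(stack.pop())
--     path.reverse()
--     return path
-- ===== Notes on version B (the rewrite author's own statement) =====
-- stated objective: alternative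
-- what changed: Replaces A's explicit-stack step machine (one self-call per machine step, re-inspecting the stack top each time) with the classic recursive Hierholzer traversal: a nested visit(node) that exhausts node's tickets and appends node in post-order, driven by a plain while over the start stack.
import Mathlib
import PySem

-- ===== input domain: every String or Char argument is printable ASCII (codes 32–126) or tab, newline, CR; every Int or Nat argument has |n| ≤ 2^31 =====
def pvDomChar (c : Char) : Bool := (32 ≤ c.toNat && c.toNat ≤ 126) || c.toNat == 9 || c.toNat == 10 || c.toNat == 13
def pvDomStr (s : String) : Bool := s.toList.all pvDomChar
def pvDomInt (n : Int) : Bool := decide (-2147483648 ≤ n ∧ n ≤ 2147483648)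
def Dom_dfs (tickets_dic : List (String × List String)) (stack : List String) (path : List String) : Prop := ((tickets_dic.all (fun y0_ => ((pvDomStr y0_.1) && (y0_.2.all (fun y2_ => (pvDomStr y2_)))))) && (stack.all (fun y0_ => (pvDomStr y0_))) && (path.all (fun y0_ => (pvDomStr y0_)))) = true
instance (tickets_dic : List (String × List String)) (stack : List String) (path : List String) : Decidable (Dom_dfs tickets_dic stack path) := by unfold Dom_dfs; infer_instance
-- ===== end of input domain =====

-- B replaces A's explicit-stack step machine with the classic recursive Hierholzer
-- traversal (post-order visit per node); return values proved equal on Dom.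
-- A and B both mutate tickets_dic/stack/path in place in Python (same mutations);
-- the equivalence proved here is about the RETURN value.


-- ===== PORT A =====
-- dict lookup, first match; a missing key behaves like an empty bucket, which is
-- exactly the Python test `depart in tickets_dic and tickets_dic[depart]`
def bucketOf (td : List (String × List String)) (k : String) : List String :=
  match td with
  | [] => []
  | (k', v) :: rest => if k' = k then v else bucketOf rest k

-- `tickets_dic[depart].pop()`: in-place removal of the bucket's last element
def popAt (td : List (String × List String)) (k : String) : List (String × List String) :=
  match td with
  | [] => []
  | (k', v) :: rest => if k' = k then (k', v.dropLast) :: rest else (k', v) :: popAt rest k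

-- total ticket count; used only as the fuel (totality guard) of the two ports
def sumT (td : List (String × List String)) : Nat := (td.map (fun p => p.2.length)).sum

-- A, step for step; fuel = exact bound on the number of self-calls (each step
-- either consumes one ticket and pushes, or pops the stack)
def dfsA : Nat → List (String × List String) → List String → List String → List String
  | 0, _, _, path => path.reverse          -- never reached: fuel is the exact step count
  | fuel+1, td, stack, path =>
    match stack.getLast? with
    | none => path.reverse                                  -- if not stack: path.reverse(); return path
    | some depart =>                                        -- depart = stack[-1]
      let bucket := bucketOf td depart
      if bucket ≠ [] then                                   -- depart in tickets_dic and tickets_dic[depart]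
        dfsA fuel (popAt td depart) (stack ++ [bucket.getLast!]) path   -- arrive = ….pop(); stack.append(arrive)
      else
        dfsA fuel td stack.dropLast (path ++ [depart])      -- no_ticket = stack.pop(); path.append(no_ticket)

def dfs (tickets_dic : List (String × List String)) (stack : List String) (path : List String) : List String :=
  dfsA (2 * sumT tickets_dic + stack.length) tickets_dic stack path

-- ===== PORT B =====
-- visit(node): while tickets_dic.get(node) nonempty, visit(bucket.pop()); then path.append(node).
-- Returns the mutated (tickets_dic, path); fuel only guards totality (never reached
-- while fuel > sumT td, which dfs_alt arranges).
def visitB : Nat → List (String × List String) → String → List String → (List (String × List String)) × List String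
  | 0, td, _, path => (td, path)
  | fuel+1, td, node, path =>
    let bucket := bucketOf td node
    if bucket ≠ [] then
      let r := visitB fuel (popAt td node) bucket.getLast! path   -- visit(bucket.pop())
      visitB fuel r.1 node r.2                                    -- continue the while loop
    else (td, path ++ [node])                                     -- path.append(node)

-- while stack: visit(stack.pop())  — popping from the end = traversing stack reversed
def loopB : Nat → List (String × List String) → List String → List String → (List (String × List String)) × List String
  | _, td, [], path => (td, path)
  | fuel, td, v :: rest, path =>
    let r := visitB fuel td v path
    loopB fuel r.1 rest r.2

def dfs_alt (tickets_dic : List (String × List String)) (stack : List String) (path : List String) : List String :=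
  ((loopB (sumT tickets_dic + 1) tickets_dic stack.reverse path).2).reverse   -- path.reverse(); return path

-- ===== PRECONDITION & SPEC =====
def Spec_dfs (tickets_dic : List (String × List String)) (stack : List String) (path : List String) (out : List String) : Prop := out = dfs_alt tickets_dic stack path
instance (tickets_dic : List (String × List String)) (stack : List String) (path : List String) (out : List String) : Decidable (Spec_dfs tickets_dic stack path out) := by unfold Spec_dfs; infer_instance

-- ===== CLAIM (what is proved, stated in full; the proofs are below) =====
def Claim_equal_dfs : Prop := ∀ (tickets_dic : List (String × List String)) (stack : List String) (path : List String), Dom_dfs tickets_dic stack path → Spec_dfs tickets_dic stack path (dfs tickets_dic stack path)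

-- ===== LEMMAS AND PROOFS =====

theorem sumT_popAt (td : List (String × List String)) (k : String)
    (h : bucketOf td k ≠ []) : sumT (popAt td k) + 1 = sumT td := by
  induction td with
  | nil => simp [bucketOf] at h
  | cons p rest ih =>
    obtain ⟨k', v⟩ := p
    by_cases hk : k' = k
    · rw [show bucketOf ((k', v) :: rest) k = v by simp [bucketOf, hk]] at h
      simp [popAt, hk, sumT, List.length_dropLast]
      have : 0 < v.length := List.length_pos_iff.mpr h
      omega
    · simp only [bucketOf, if_neg hk] at h
      have := ih h
      simp [popAt, if_neg hk, sumT] at this ⊢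
      omega

theorem sumT_popAt_le (td : List (String × List String)) (k : String) :
    sumT (popAt td k) ≤ sumT td := by
  induction td with
  | nil => simp [popAt]
  | cons p rest ih =>
    obtain ⟨k', v⟩ := p
    by_cases hk : k' = k
    · simp [popAt, hk, sumT, List.length_dropLast]
    · simp [popAt, if_neg hk, sumT] at ih ⊢
      omega

theorem visitB_sum_le : ∀ (f : Nat) (td : List (String × List String)) (node : String) (path : List String),
    sumT (visitB f td node path).1 ≤ sumT td := by
  intro f
  induction f with
  | zero => intro td node path; simp [visitB]
  | succ f ih =>
    intro td node path
    by_cases hb : bucketOf td node ≠ []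
    · simp only [visitB, if_pos hb]
      calc sumT (visitB f (visitB f (popAt td node) (bucketOf td node).getLast! path).1 node
              (visitB f (popAt td node) (bucketOf td node).getLast! path).2).1
          ≤ sumT (visitB f (popAt td node) (bucketOf td node).getLast! path).1 := ih _ _ _
        _ ≤ sumT (popAt td node) := ih _ _ _
        _ ≤ sumT td := sumT_popAt_le td node
    · simp [visitB, if_neg hb]

-- one unfolding of dfs on a nonempty stack, with the fuel re-expressed exactly
theorem dfs_nil (td : List (String × List String)) (path : List String) :
    dfs td [] path = path.reverse := by
  unfold dfs
  cases h : 2 * sumT td + List.length ([] : List String) with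
  | zero => simp [dfsA]
  | succ n => simp [dfsA]

theorem dfs_step (td : List (String × List String)) (stack path : List String)
    (rest : List String) (v : String) (hs : stack = rest ++ [v]) :
    dfs td stack path =
      (if bucketOf td v ≠ [] then
        dfs (popAt td v) (stack ++ [(bucketOf td v).getLast!]) path
      else
        dfs td rest (path ++ [v])) := by
  subst hs
  unfold dfs
  have hlen : (rest ++ [v]).length = rest.length + 1 := by simp
  rw [hlen]
  have hfuel : 2 * sumT td + (rest.length + 1) = (2 * sumT td + rest.length) + 1 := by omega
  rw [hfuel]
  simp only [dfsA, List.getLast?_concat]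
  by_cases hb : bucketOf td v ≠ []
  · simp only [if_pos hb]
    have hsum : sumT (popAt td v) + 1 = sumT td := sumT_popAt td v hb
    have : 2 * sumT td + rest.length = 2 * sumT (popAt td v) + ((rest ++ [v]) ++ [(bucketOf td v).getLast!]).length := by
      simp; omega
    rw [this]
  · simp only [if_neg hb]
    have : (rest ++ [v]).dropLast = rest := by simp
    rw [this]

-- the stack machine from a state with v on top runs exactly visit(v), then continues
theorem sim : ∀ (f : Nat) (td : List (String × List String)) (node : String)
    (path rest : List String), sumT td < f →
    dfs td (rest ++ [node]) path
      = dfs (visitB f td node path).1 rest (visitB f td node path).2 := by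
  intro f
  induction f with
  | zero => intro td node path rest h; omega
  | succ f ih =>
    intro td node path rest h
    by_cases hb : bucketOf td node ≠ []
    · have h1 : sumT (popAt td node) + 1 = sumT td := sumT_popAt td node hb
      have h1' : sumT (popAt td node) < f := by omega
      have h2 : sumT (visitB f (popAt td node) (bucketOf td node).getLast! path).1 < f :=
        lt_of_le_of_lt (visitB_sum_le f _ _ _) h1'
      rw [dfs_step td (rest ++ [node]) path rest node rfl, if_pos hb]
      rw [show (rest ++ [node]) ++ [(bucketOf td node).getLast!]
            = (rest ++ [node]) ++ [(bucketOf td node).getLast!] from rfl]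
      rw [ih (popAt td node) (bucketOf td node).getLast! path (rest ++ [node]) h1']
      rw [ih _ node _ rest h2]
      simp only [visitB, if_pos hb]
    · rw [dfs_step td (rest ++ [node]) path rest node rfl, if_neg hb]
      simp only [visitB, if_neg hb]

theorem loop_sim : ∀ (rs : List String) (f : Nat) (td : List (String × List String))
    (path : List String), sumT td < f →
    dfs td rs.reverse path = ((loopB f td rs path).2).reverse := by
  intro rs
  induction rs with
  | nil =>
    intro f td path h
    simp only [List.reverse_nil, loopB]
    exact dfs_nil td path
  | cons v rest ih =>
    intro f td path h
    have hmono : sumT (visitB f td v path).1 < f :=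
      lt_of_le_of_lt (visitB_sum_le f td v path) h
    simp only [List.reverse_cons]
    rw [sim f td v path rest.reverse h]
    rw [ih f (visitB f td v path).1 (visitB f td v path).2 hmono]
    simp only [loopB]

-- ===== VERDICT (by name: the statement is the Claim_ definition above) =====
theorem dfs_spec : Claim_equal_dfs := by
  intro td stack path _
  unfold Spec_dfs dfs_alt
  have h : sumT td < sumT td + 1 := Nat.lt_succ_self _
  have := loop_sim stack.reverse (sumT td + 1) td path h
  rw [List.reverse_reverse] at this
  exact this
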